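-- pv_equiv track=rewrite | github.com/Ashiq-am/Data-Structures-Algorithm | 1.Python Algorithms/8.Bitwise Algorithms/2.Intermediate/70.Alternate bits of two numbers to create a new number/Alternate bits of two numbers to create a new number.py | setoddbits
-- ===== SOURCE A (Python) =====
-- def setoddbits(m):
--     temp = m
--     count = 0
--
--     # res for store 101010.. number
--     res = 0
--
--     # generate number form of 101010....
--     # till temp size
--     while temp > 0:
--
--         # if bit is even then generate
--         # number and or with res
--         if not count % 2:
--             res |= (1 << count)
--
--         count += 1
--         temp >>= 1
--
--     # return set odd bit number
--     return (m & res)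
-- ===== SOURCE B (Python) =====
-- def setoddbits(m):
--     result = 0
--     shift = 0
--     while m > 0:
--         result |= (m & 1) << shift
--         m >>= 2
--         shift += 2
--     return result
-- ===== Notes on version B (the rewrite author's own statement) =====
-- stated objective: simpler
-- what changed: Instead of a parity-counter loop that first builds an alternating-bit mask over m's bit-length and then ANDs m with it, B assembles the result directly in one loop that strides over the even bit positions, OR-ing each even-position bit of m into the accumulator and dropping both the parity branch and the separate mask-then-AND step.
import Mathlib
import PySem

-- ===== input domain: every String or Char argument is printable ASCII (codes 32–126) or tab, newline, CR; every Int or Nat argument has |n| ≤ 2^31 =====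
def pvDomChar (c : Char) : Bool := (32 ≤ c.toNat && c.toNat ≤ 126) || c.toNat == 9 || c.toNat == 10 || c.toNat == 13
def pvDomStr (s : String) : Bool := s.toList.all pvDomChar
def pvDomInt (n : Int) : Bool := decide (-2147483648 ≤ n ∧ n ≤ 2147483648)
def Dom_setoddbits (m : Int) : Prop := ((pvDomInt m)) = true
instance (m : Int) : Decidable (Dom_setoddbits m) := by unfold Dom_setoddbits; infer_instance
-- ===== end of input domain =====

-- B assembles the result directly two bits at a time (no parity counter, no separate
-- mask-then-AND step); objective: simpler, same asymptotic cost.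

-- ===== PORT A =====
-- while temp > 0: if not count % 2: res |= 1 << count; count += 1; temp >>= 1
def setoddbitsLoop (temp : Int) (count : Nat) (res : Int) : Int :=
  if 0 < temp then
    setoddbitsLoop (temp >>> (1:Nat)) (count + 1)
      (if count % 2 = 0 then PySem.Int.bor res (1 <<< count) else res)
  else res
termination_by temp.toNat
decreasing_by simp [Int.shiftRight_eq_div_pow]; omega

def setoddbits (m : Int) : Int := PySem.Int.band m (setoddbitsLoop m 0 0)

-- ===== PORT B =====
-- while m > 0: result |= (m & 1) << shift; m >>= 2; shift += 2
def setoddbitsAltLoop (m : Int) (shift : Nat) (result : Int) : Int :=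
  if 0 < m then
    setoddbitsAltLoop (m >>> (2:Nat)) (shift + 2)
      (PySem.Int.bor result ((PySem.Int.band m 1) <<< shift))
  else result
termination_by m.toNat
decreasing_by simp [Int.shiftRight_eq_div_pow]; omega

def setoddbits_alt (m : Int) : Int := setoddbitsAltLoop m 0 0

-- ===== PRECONDITION & SPEC =====
def Spec_setoddbits (m : Int) (out : Int) : Prop := out = setoddbits_alt m
instance (m : Int) (out : Int) : Decidable (Spec_setoddbits m out) := by unfold Spec_setoddbits; infer_instance

-- ===== CLAIM (what is proved, stated in full; the proofs are below) =====
def Claim_equal_setoddbits : Prop := ∀ (m : Int), Dom_setoddbits m → Spec_setoddbits m (setoddbits m)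

-- ===== LEMMAS AND PROOFS =====

-- alternating mask of the bit-length of n, two bits at a time (value of A's loop)
def maskN (n : Nat) : Nat :=
  if n = 0 then 0 else 1 ||| (maskN (n / 4) <<< 2)
termination_by n
decreasing_by omega

-- even-position bits of n (value of B's loop)
def gN (n : Nat) : Nat :=
  if n = 0 then 0 else (n &&& 1) ||| (gN (n / 4) <<< 2)
termination_by n
decreasing_by omega

lemma testBit_one' (i : Nat) : (1 : Nat).testBit i = decide (i = 0) := by
  rcases i with _ | i
  · decide
  · simp [Nat.testBit_succ]

-- bit shuffle used to reassociate the accumulators of both loops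
lemma shuffle (r a X c : Nat) :
    (r ||| a <<< c) ||| (X <<< (c + 2)) = r ||| ((a ||| X <<< 2) <<< c) := by
  apply Nat.eq_of_testBit_eq
  intro i
  simp only [Nat.testBit_lor, Nat.testBit_shiftLeft]
  by_cases h : c ≤ i
  · by_cases h2 : c + 2 ≤ i
    · have : i - c - 2 = i - (c + 2) := by omega
      simp [h, h2, Nat.le_sub_of_add_le' (by omega), this, Bool.or_assoc]
    · have h3 : ¬ (2 ≤ i - c) := by omega
      simp [h, h2, h3]
  · have h2 : ¬ (c + 2 ≤ i) := by omega
    simp [h, h2]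

-- the key bitwise identity: ANDing with the alternating mask peels off bit 0 and recurses on n >>> 2
lemma key_step (n X : Nat) :
    n &&& (1 ||| X <<< 2) = (n &&& 1) ||| ((n >>> 2 &&& X) <<< 2) := by
  apply Nat.eq_of_testBit_eq
  intro i
  simp only [Nat.testBit_land, Nat.testBit_lor, Nat.testBit_shiftLeft,
    Nat.testBit_shiftRight, testBit_one']
  rcases i with _ | _ | i
  · simp
  · simp
  · have h1 : (2:Nat) ≤ i + 2 := by omega
    have h2 : i + 2 - 2 = i := by omega
    have h3 : 2 + i = i + 2 := by omega
    simp [h1, h2, h3]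

lemma keyN (n : Nat) : n &&& maskN n = gN n := by
  induction n using Nat.strong_induction_on with
  | _ n ih =>
    rcases Nat.eq_zero_or_pos n with h | h
    · subst h; simp [maskN, gN]
    · rw [maskN, gN, if_neg (by omega), if_neg (by omega), key_step,
        Nat.shiftRight_eq_div_pow, ih (n / 4) (by omega)]

-- A's loop with even count appended: two Python iterations collapse to one 2-bit step
lemma A_twostep (t : Int) (ht : 0 < t) (c : Nat) (hc : c % 2 = 0) (r : Int) :
    setoddbitsLoop t c r = setoddbitsLoop (t >>> (2:Nat)) (c + 2) (PySem.Int.bor r (1 <<< c)) := by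
  rw [setoddbitsLoop.eq_def, if_pos ht, if_pos hc]
  rw [setoddbitsLoop.eq_def]
  by_cases h1 : 0 < t >>> (1:Nat)
  · rw [if_pos h1, if_neg (by omega)]
    have : t >>> (1:Nat) >>> (1:Nat) = t >>> (2:Nat) := by
      simp [Int.shiftRight_eq_div_pow]; omega
    rw [this]
  · rw [if_neg h1]
    have ht1 : t = 1 := by
      simp [Int.shiftRight_eq_div_pow] at h1; omega
    subst ht1
    rw [setoddbitsLoop.eq_def, if_neg (by decide)]

lemma LA (n : Nat) : ∀ (c : Nat) (r : Nat), c % 2 = 0 →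
    setoddbitsLoop (n : Int) c (r : Int) = ((r ||| (maskN n <<< c) : Nat) : Int) := by
  induction n using Nat.strong_induction_on with
  | _ n ih =>
    intro c r hc
    rcases Nat.eq_zero_or_pos n with h | h
    · subst h
      rw [setoddbitsLoop.eq_def, if_neg (by norm_num)]
      simp [maskN]
    · rw [A_twostep _ (by exact_mod_cast h) _ hc]
      rw [PySem.Int.bor_natCast]
      rw [← Int.natCast_shiftRight]
      rw [ih (n >>> 2) (by rw [Nat.shiftRight_eq_div_pow]; omega) (c + 2) (r ||| 1 <<< c) (by omega)]
      rw [Nat.shiftRight_eq_div_pow, shuffle]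
      conv_rhs => rw [maskN, if_neg (show ¬ n = 0 by omega)]

lemma LB (n : Nat) : ∀ (s : Nat) (r : Nat),
    setoddbitsAltLoop (n : Int) s (r : Int) = ((r ||| (gN n <<< s) : Nat) : Int) := by
  induction n using Nat.strong_induction_on with
  | _ n ih =>
    intro s r
    rcases Nat.eq_zero_or_pos n with h | h
    · subst h
      rw [setoddbitsAltLoop.eq_def, if_neg (by norm_num)]
      simp [gN]
    · rw [setoddbitsAltLoop.eq_def, if_pos (by exact_mod_cast h)]
      have hb : PySem.Int.band (n : Int) 1 = ((n &&& 1 : Nat) : Int) := by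
        exact_mod_cast PySem.Int.band_natCast n 1
      rw [hb, ← Int.natCast_shiftLeft, PySem.Int.bor_natCast]
      rw [← Int.natCast_shiftRight]
      rw [ih (n >>> 2) (by rw [Nat.shiftRight_eq_div_pow]; omega) (s + 2) (r ||| (n &&& 1) <<< s)]
      rw [Nat.shiftRight_eq_div_pow, shuffle]
      conv_rhs => rw [gN, if_neg (show ¬ n = 0 by omega)]

-- ===== VERDICT (by name: the statement is the Claim_ definition above) =====
theorem setoddbits_spec : Claim_equal_setoddbits := by
  intro m _
  unfold Spec_setoddbits setoddbits setoddbits_alt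
  by_cases hm : 0 < m
  · have hn : m = ((m.toNat : Nat) : Int) := by omega
    rw [hn]
    have h0 : ((0 : Nat) : Int) = (0 : Int) := by norm_num
    rw [← h0, LA _ 0 0 (by decide), LB _ 0 0]
    rw [PySem.Int.band_natCast]
    simp [keyN]
  · rw [setoddbitsLoop.eq_def, if_neg hm, setoddbitsAltLoop, if_neg hm]
    simp [PySem.Int.band_zero]
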